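-- pv_equiv track=rewrite | github.com/Glueymetal/Cryptography_CIA | gronsfeld.py | gronsfeld_encrypt
-- ===== SOURCE A (Python) =====
-- def gronsfeld_encrypt(text,key):
--     text = text.upper()
--     ciphertext = ""
--
--     alpha_count = sum(1 for c in text if c.isalpha())
--     while len(key) < alpha_count:
--         key += key
--
--     key_index = 0
--
--     for i in range(len(text)):
--         c = text[i]
--         if c.isalpha():
--             shift = int(key[key_index])
--             key_index += 1
--             base = ord('A')
--             ciphertext = ciphertext + chr((ord(c) - base + shift) % 26 + base)
--         else:
--             ciphertext = ciphertext + c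
--
--     return ciphertext
-- ===== SOURCE B (Python) =====
-- def gronsfeld_encrypt(text, key):
--     T = text.upper()
--     letters = [c for c in T if c.isalpha()]
--     if letters and key:
--         ks = (key * (len(letters) // len(key) + 1))[:len(letters)]
--         A = "ABCDEFGHIJKLMNOPQRSTUVWXYZ"
--         tables = [A[s:] + A[:s] for s in range(10)]
--         enc = [tables[int(d)][A.index(c)] for c, d in zip(letters, ks)]
--     else:
--         enc = []
--     out = []
--     i = 0
--     for c in T:
--         if c.isalpha():
--             out.append(enc[i])
--             i += 1
--         else:
--             out.append(c)
--     return ''.join(out)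
-- ===== Notes on version B (the rewrite author's own statement) =====
-- stated objective: alternative
-- what changed: Split/encrypt/merge staging instead of A's interleaved scan: extract the letters, batch-encrypt them by zipping with a sliced key repetition and looking each letter up in one of ten precomputed rotated-alphabet translation tables (no per-character chr/ord arithmetic, no key-doubling loop), then merge the encrypted letters back over the non-letters with a list + ''.join instead of string concatenation.
import Mathlib
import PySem

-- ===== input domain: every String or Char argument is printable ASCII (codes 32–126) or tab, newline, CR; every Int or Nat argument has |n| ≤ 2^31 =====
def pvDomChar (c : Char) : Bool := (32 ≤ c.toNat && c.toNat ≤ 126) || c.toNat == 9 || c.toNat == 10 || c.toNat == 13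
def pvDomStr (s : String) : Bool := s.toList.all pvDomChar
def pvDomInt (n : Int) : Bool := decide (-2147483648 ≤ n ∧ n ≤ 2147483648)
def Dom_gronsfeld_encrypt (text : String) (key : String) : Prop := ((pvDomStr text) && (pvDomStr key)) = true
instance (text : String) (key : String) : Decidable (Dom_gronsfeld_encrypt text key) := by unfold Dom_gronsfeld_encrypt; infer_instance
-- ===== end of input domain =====

-- B: split/encrypt/merge — extract letters, batch-encrypt them via zip with a sliced key
-- repetition and rotated-alphabet translation tables, then merge back (alternative structure).


-- ===== PORT A =====
-- chr((ord(c) - ord('A') + int(d)) % 26 + ord('A'))  (shared arithmetic helper of A's loop body)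
def pvEncChar (c d : Char) : Char :=
  Char.ofNat ((PySem.Int.mod ((c.toNat : Int) - 65 + (PySem.Int.ofChars? [d]).getD 0) 26 + 65).toNat)

-- while len(key) < alpha_count: key += key   (fuel = alpha_count bounds the doubling:
-- length at least doubles each step, so alpha_count steps always suffice when key ≠ "";
-- for key = "" the Python loop diverges — excluded by Pre_)
def pvGrow (fuel : Nat) (key : List Char) (ac : Nat) : List Char :=
  match fuel with
  | 0 => key
  | f + 1 => if key.length < ac then pvGrow f (key ++ key) ac else key

-- the for-loop over text: c alpha → append encrypted char using key2[key_index], bump index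
def pvALoop (cs : List Char) (key2 : List Char) (ki : Nat) (acc : List Char) : List Char :=
  match cs with
  | [] => acc
  | c :: rest =>
    if PySem.Chars.isalpha c then
      pvALoop rest key2 (ki + 1) (acc ++ [pvEncChar c (key2.getD ki ' ')])  -- int(key[key_index]) in range & digit under Pre_
    else
      pvALoop rest key2 ki (acc ++ [c])

def gronsfeld_encrypt (text : String) (key : String) : String :=
  let t := (PySem.Str.upper text).toList
  let alpha_count := t.countP (fun c => PySem.Chars.isalpha c)
  let key2 := pvGrow alpha_count key.toList alpha_count
  String.ofList (pvALoop t key2 0 [])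

-- ===== PORT B =====
def pvAlpha : List Char := "ABCDEFGHIJKLMNOPQRSTUVWXYZ".toList

-- tables = [A[s:] + A[:s] for s in range(10)]  (slices with nonnegative in-range bounds = drop/take)
def pvTables : List (List Char) := (List.range 10).map (fun s => pvAlpha.drop s ++ pvAlpha.take s)

-- enc = [tables[int(d)][A.index(c)] for c, d in zip(letters, ks)]
-- (under Pre_ every used d is a digit, so tables[int(d)] and A.index(c) are in range)
def pvBEnc (letters ks : List Char) : List Char :=
  (letters.zip ks).map (fun p =>
    (pvTables.getD ((PySem.Int.ofChars? [p.2]).getD 0).toNat []).getD (pvAlpha.idxOf p.1) ' ')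

-- the merge loop: out.append(enc[i]) for letters (i += 1), out.append(c) otherwise
def pvBMerge (cs enc : List Char) (i : Nat) (out : List Char) : List Char :=
  match cs with
  | [] => out
  | c :: rest =>
    if PySem.Chars.isalpha c then
      pvBMerge rest enc (i + 1) (out ++ [enc.getD i ' '])
    else
      pvBMerge rest enc i (out ++ [c])

def gronsfeld_encrypt_alt (text : String) (key : String) : String :=
  let t := (PySem.Str.upper text).toList
  let letters := t.filter (fun c => PySem.Chars.isalpha c)
  -- ks = (key * (len(letters) // len(key) + 1))[:len(letters)]; '//' on nonnegative ints = Nat division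
  let enc :=
    if letters ≠ [] ∧ key.toList ≠ [] then
      pvBEnc letters
        (((List.replicate (letters.length / key.toList.length + 1) key.toList).flatten).take letters.length)
    else []
  String.ofList (pvBMerge t enc 0 [])

-- ===== PRECONDITION & SPEC =====
-- Pre_ excludes exactly the inputs where the Python A does not return: key = "" with at
-- least one letter (the doubling loop diverges), and a non-digit key character at a
-- position the cipher actually uses (int() raises ValueError there).
def Pre_gronsfeld_encrypt (text : String) (key : String) : Prop :=
  (key ≠ "" ∨ (PySem.Str.upper text).toList.countP (fun c => PySem.Chars.isalpha c) = 0) ∧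
  ∀ j < min ((PySem.Str.upper text).toList.countP (fun c => PySem.Chars.isalpha c)) key.toList.length,
    PySem.Chars.isdigit (key.toList.getD j ' ') = true
instance (text : String) (key : String) : Decidable (Pre_gronsfeld_encrypt text key) := by
  unfold Pre_gronsfeld_encrypt; infer_instance

def pvWitness_gronsfeld_encrypt : String × String := ("Attack at dawn!", "2015")

def Spec_gronsfeld_encrypt (text : String) (key : String) (out : String) : Prop := out = gronsfeld_encrypt_alt text key
instance (text : String) (key : String) (out : String) : Decidable (Spec_gronsfeld_encrypt text key out) := by unfold Spec_gronsfeld_encrypt; infer_instance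

-- ===== CLAIM (what is proved, stated in full; the proofs are below) =====
def Claim_equal_gronsfeld_encrypt : Prop := ∀ (text : String) (key : String), Dom_gronsfeld_encrypt text key → Pre_gronsfeld_encrypt text key → Spec_gronsfeld_encrypt text key (gronsfeld_encrypt text key)

-- ===== LEMMAS AND PROOFS =====

-- b is a "stack of copies" of a: length divisible, lookup periodic
def pvInv (a b : List Char) : Prop :=
  a.length ∣ b.length ∧ ∀ i < b.length, b.getD i ' ' = a.getD (i % a.length) ' '

lemma pvInv_refl (a : List Char) : pvInv a a :=
  ⟨dvd_refl _, fun i hi => by rw [Nat.mod_eq_of_lt hi]⟩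

lemma pvInv_double (a : List Char) : pvInv a (a ++ a) := by
  refine ⟨⟨2, by simp; ring⟩, fun i hi => ?_⟩
  simp only [List.length_append] at hi
  by_cases h : i < a.length
  · rw [List.getD_append _ _ _ _ h, Nat.mod_eq_of_lt h]
  · have hk : a.length ≤ i := le_of_not_gt h
    rw [List.getD_append_right _ _ _ _ hk, Nat.mod_eq_sub_mod hk,
      Nat.mod_eq_of_lt (by omega)]

lemma pvInv_trans (a b c : List Char) (h1 : pvInv a b) (h2 : pvInv b c) : pvInv a c := by
  obtain ⟨d1, p1⟩ := h1
  obtain ⟨d2, p2⟩ := h2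
  refine ⟨dvd_trans d1 d2, fun i hi => ?_⟩
  have hb : 0 < b.length := by
    rcases Nat.eq_zero_or_pos b.length with h0 | h0
    · rw [h0] at d2
      have := Nat.eq_zero_of_zero_dvd d2
      omega
    · exact h0
  rw [p2 i hi, p1 _ (Nat.mod_lt _ hb), Nat.mod_mod_of_dvd i d1]

lemma pvGrow_inv (fuel : Nat) : ∀ (key : List Char) (ac : Nat), pvInv key (pvGrow fuel key ac) := by
  induction fuel with
  | zero => intro key ac; exact pvInv_refl key
  | succ f ih =>
    intro key ac
    unfold pvGrow
    split
    · exact pvInv_trans _ _ _ (pvInv_double key) (ih (key ++ key) ac)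
    · exact pvInv_refl key

-- the grown key is long enough
lemma pvGrow_length (fuel : Nat) : ∀ (key : List Char) (ac : Nat),
    1 ≤ key.length → ac ≤ key.length + fuel → ac ≤ (pvGrow fuel key ac).length := by
  induction fuel with
  | zero => intro key ac _ h; simpa [pvGrow] using by omega
  | succ f ih =>
    intro key ac h1 h2
    unfold pvGrow
    split
    · apply ih (key ++ key) ac (by simp; omega)
      simp only [List.length_append]; omega
    · omega

-- flattened replication looks up modularly
lemma flat_rep_getD (m : Nat) : ∀ (key : List Char) (j : Nat), key ≠ [] → j < m * key.length →
    ((List.replicate m key).flatten).getD j ' ' = key.getD (j % key.length) ' ' := by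
  induction m with
  | zero => intro key j _ h; omega
  | succ m ih =>
    intro key j hk hj
    have hkl : 0 < key.length := List.length_pos_iff.mpr hk
    rw [List.replicate_succ, List.flatten_cons]
    by_cases h : j < key.length
    · rw [List.getD_append _ _ _ _ h, Nat.mod_eq_of_lt h]
    · have hge : key.length ≤ j := le_of_not_gt h
      rw [List.getD_append_right _ _ _ _ hge, Nat.mod_eq_sub_mod hge]
      have : (m+1) * key.length = key.length + m * key.length := by ring
      exact ih key (j - key.length) hk (by omega)

-- alpha characters of an uppercased string are 'A'..'Z'
lemma upper_alpha_bounds (c : Char) (h : PySem.Chars.isalpha (PySem.Chars.upperChar c) = true) :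
    65 ≤ (PySem.Chars.upperChar c).toNat ∧ (PySem.Chars.upperChar c).toNat ≤ 90 := by
  by_cases hl : PySem.Chars.islower c = true
  · have h1 : 97 ≤ c.toNat ∧ c.toNat ≤ 122 := by
      simp only [PySem.Chars.islower, Bool.and_eq_true, decide_eq_true_eq] at hl
      simp only [Char.le_def, UInt32.le_iff_toNat_le] at hl
      exact hl
    simp only [PySem.Chars.upperChar, hl, if_pos, Char.toNat_ofNat,
      show (c.toNat - 32).isValidChar from Or.inl (by omega)]
    omega
  · simp only [PySem.Chars.upperChar, hl, if_false, Bool.false_eq_true] at h ⊢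
    simp only [PySem.Chars.isalpha, PySem.Chars.isupper, hl, Bool.or_false] at h
    simp only [Bool.and_eq_true, decide_eq_true_eq, Char.le_def, UInt32.le_iff_toNat_le] at h
    exact h

lemma isdigit_bounds (d : Char) (h : PySem.Chars.isdigit d = true) :
    48 ≤ d.toNat ∧ d.toNat ≤ 57 := by
  simp only [PySem.Chars.isdigit, Bool.and_eq_true, decide_eq_true_eq, Char.le_def,
    UInt32.le_iff_toNat_le] at h
  exact h

-- B's table lookup computes A's modular arithmetic on letters and digit shifts (260 finite cases)
set_option maxRecDepth 4000 in
lemma tbl_enc (c d : Char) (hc1 : 65 ≤ c.toNat) (hc2 : c.toNat ≤ 90)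
    (hd1 : 48 ≤ d.toNat) (hd2 : d.toNat ≤ 57) :
    (pvTables.getD ((PySem.Int.ofChars? [d]).getD 0).toNat []).getD (pvAlpha.idxOf c) ' ' = pvEncChar c d := by
  rw [← Char.ofNat_toNat c, ← Char.ofNat_toNat d]
  set m := c.toNat with hm
  set n := d.toNat with hn
  interval_cases m <;> interval_cases n <;> decide

-- index j of a mapped zip, in getD form
lemma zip_map_getD (a b : List Char) (f : Char × Char → Char) (j : Nat)
    (h1 : j < a.length) (h2 : j < b.length) :
    ((a.zip b).map f).getD j ' ' = f (a.getD j ' ', b.getD j ' ') := by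
  have hz : j < ((a.zip b).map f).length := by
    simp [List.length_zip]; omega
  rw [List.getD_eq_getElem _ _ hz, List.getElem_map, List.getElem_zip,
    List.getD_eq_getElem _ _ h1, List.getD_eq_getElem _ _ h2]

-- A's loop equals B's merge loop whenever enc holds the encrypted letters at the used indices
lemma merge_eq (cs : List Char) : ∀ (dk enc : List Char) (ki : Nat) (acc : List Char),
    (∀ j < cs.countP (fun c => PySem.Chars.isalpha c),
      enc.getD (ki + j) ' ' =
        pvEncChar ((cs.filter (fun c => PySem.Chars.isalpha c)).getD j ' ') (dk.getD (ki + j) ' ')) →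
    pvALoop cs dk ki acc = pvBMerge cs enc ki acc := by
  induction cs with
  | nil => intro dk enc ki acc _; rfl
  | cons c rest ih =>
    intro dk enc ki acc H
    unfold pvALoop pvBMerge
    by_cases hc : PySem.Chars.isalpha c = true
    · rw [if_pos hc, if_pos hc]
      have h0 := H 0 (by simp [hc])
      simp only [Nat.add_zero, List.filter_cons, hc, if_pos, List.getD_cons_zero] at h0
      rw [← h0]
      exact ih _ _ _ _ (fun j hj => by
        have := H (j + 1) (by simp only [List.countP_cons, hc, if_pos]; omega)
        have he : ki + (j + 1) = ki + 1 + j := by omega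
        rw [he] at this
        simpa only [List.filter_cons, hc, if_pos, List.getD_cons_succ] using this)
    · rw [if_neg hc, if_neg hc]
      exact ih _ _ _ _ (fun j hj => by
        have := H j (by simp only [List.countP_cons, hc]; simpa using hj)
        simpa only [List.filter_cons, hc] using this)

-- ===== VERDICT (by name: the statement is the Claim_ definition above) =====
set_option maxHeartbeats 1000000 in
theorem gronsfeld_encrypt_spec : Claim_equal_gronsfeld_encrypt := by
  intro text key _ hpre
  obtain ⟨hk, hdig⟩ := hpre
  unfold Spec_gronsfeld_encrypt gronsfeld_encrypt gronsfeld_encrypt_alt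
  set t := (PySem.Str.upper text).toList with ht
  set ac := t.countP (fun c => PySem.Chars.isalpha c) with hac
  set letters := t.filter (fun c => PySem.Chars.isalpha c) with hletters
  have hlen : letters.length = ac := by
    rw [hletters, hac, List.countP_eq_length_filter]
  show String.ofList (pvALoop t (pvGrow ac key.toList ac) 0 [])
      = String.ofList (pvBMerge t
          (if letters ≠ [] ∧ key.toList ≠ [] then
            pvBEnc letters
              (((List.replicate (letters.length / key.toList.length + 1) key.toList).flatten).take letters.length)
          else []) 0 [])
  congr 1
  apply merge_eq
  intro j hj
  rw [← hac] at hj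
  simp only [Nat.zero_add]
  by_cases hL : letters = []
  · exfalso; rw [hL] at hlen; simp at hlen; omega
  · have hkey : key.toList ≠ [] := by
      rcases hk with h | h
      · intro he
        apply h
        have := congrArg String.ofList he
        rw [String.ofList_toList] at this
        simpa using this
      · omega
    rw [if_pos ⟨hL, hkey⟩]
    set k := key.toList.length with hkk
    have hk1 : 1 ≤ k := by
      rw [hkk]; cases he : key.toList with
      | nil => exact absurd he hkey
      | cons a l => simp
    -- the grown key looks up modularly
    have hdk : (pvGrow ac key.toList ac).getD j ' ' = key.toList.getD (j % k) ' ' := by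
      have hlong : ac ≤ (pvGrow ac key.toList ac).length :=
        pvGrow_length ac key.toList ac hk1 (by omega)
      exact (pvGrow_inv ac key.toList ac).2 j (by omega)
    -- ks looks up modularly too
    have hn : letters.length = ac := hlen
    have hflen : ((List.replicate (letters.length / k + 1) key.toList).flatten).length
        = (letters.length / k + 1) * k := by
      simp only [List.length_flatten, List.map_replicate, List.sum_replicate, smul_eq_mul]
      rw [← hkk]
    have hjlt : j < (letters.length / k + 1) * k := by
      have hexp : (letters.length / k + 1) * k = k * (letters.length / k) + k := by ring
      have := Nat.div_add_mod letters.length k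
      have := Nat.mod_lt letters.length (show 0 < k by omega)
      omega
    have hks : (((List.replicate (letters.length / k + 1) key.toList).flatten).take letters.length).getD j ' '
        = key.toList.getD (j % k) ' ' := by
      rw [List.getD_eq_getElem?_getD, List.getElem?_take, if_pos (by omega),
        ← List.getD_eq_getElem?_getD]
      exact flat_rep_getD _ key.toList j hkey hjlt
    -- the digit used at position j
    have hdigj : PySem.Chars.isdigit (key.toList.getD (j % k) ' ') = true := by
      apply hdig
      have h1 : j % k < k := Nat.mod_lt _ (by omega)
      have h2 : j % k ≤ j := Nat.mod_le j k
      omega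
    -- the letter at position j comes from the uppercased text
    have hjl : j < letters.length := by omega
    have hmem : letters.getD j ' ' ∈ letters := by
      rw [List.getD_eq_getElem _ _ hjl]; exact List.getElem_mem hjl
    have hcb : 65 ≤ (letters.getD j ' ').toNat ∧ (letters.getD j ' ').toNat ≤ 90 := by
      have h1 : letters.getD j ' ' ∈ t ∧ PySem.Chars.isalpha (letters.getD j ' ') = true := by
        rw [hletters] at hmem
        exact ⟨(List.mem_filter.mp hmem).1, (List.mem_filter.mp hmem).2⟩
      obtain ⟨hmt, hal⟩ := h1
      rw [ht, PySem.Str.toList_upper, PySem.Chars.upper] at hmt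
      obtain ⟨c0, _, hc0⟩ := List.mem_map.mp hmt
      rw [← hc0] at hal ⊢
      exact upper_alpha_bounds c0 hal
    -- unfold B's batch map at index j
    unfold pvBEnc
    set ks := ((List.replicate (letters.length / k + 1) key.toList).flatten).take letters.length with hksdef
    have hkslen : j < ks.length := by
      rw [hksdef, List.length_take]; omega
    rw [zip_map_getD letters ks _ j hjl hkslen]
    simp only []
    rw [hdk, hks]
    obtain ⟨hd1, hd2⟩ := isdigit_bounds _ hdigj
    exact tbl_enc _ _ hcb.1 hcb.2 hd1 hd2
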